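-- pv_equiv track=rewrite | github.com/facebookresearch/wmar | syncseal/notebooks/nb_utils.py | sweepable_params
-- ===== SOURCE A (Python) =====
-- def sweepable_params(params):
--     sweepable = {}
--     for path, param in params.items():
--         for k, v in param.items():
--             if k not in sweepable:
--                 sweepable[k] = []
--             if v not in sweepable[k]:
--                 sweepable[k].append(v)
--     sweepable = {k: v for k, v in sweepable.items() if len(v)>1}
--     sweepable = {k: v for k, v in sweepable.items() if 'master_port' not in k.lower()}
--     return sweepable
-- ===== SOURCE B (Python) =====
-- def _distinct(xs):
--     # positional first-occurrence filter (list.index uses ==, so unhashables are fine)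
--     return [x for i, x in enumerate(xs) if xs.index(x) == i]
--
-- def sweepable_params(params):
--     # Dict-free: flatten to (key, value) pairs, take keys in first-occurrence order,
--     # then rescan the flat pair list once per key for its distinct values.
--     pairs = [(k, v) for param in params.values() for k, v in param.items()]
--     keys = _distinct([k for k, _ in pairs])
--     result = {}
--     for k in keys:
--         if 'master_port' in k.lower():
--             continue
--         uniq = _distinct([v for k2, v in pairs if k2 == k])
--         if len(uniq) > 1:
--             result[k] = uniq
--     return result
-- ===== Notes on version B (the rewrite author's own statement) =====
-- stated objective: alternative
-- what changed: B drops A's incrementally-updated dict of deduped lists entirely: it flattens params to one (key, value) pair list, computes keys in first-occurrence order with a positional index test, and rescans the flat list once per key, deduplicating by 'first occurrence at this position' (xs.index(x) == i) instead of membership-checked appends.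
import Mathlib
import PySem

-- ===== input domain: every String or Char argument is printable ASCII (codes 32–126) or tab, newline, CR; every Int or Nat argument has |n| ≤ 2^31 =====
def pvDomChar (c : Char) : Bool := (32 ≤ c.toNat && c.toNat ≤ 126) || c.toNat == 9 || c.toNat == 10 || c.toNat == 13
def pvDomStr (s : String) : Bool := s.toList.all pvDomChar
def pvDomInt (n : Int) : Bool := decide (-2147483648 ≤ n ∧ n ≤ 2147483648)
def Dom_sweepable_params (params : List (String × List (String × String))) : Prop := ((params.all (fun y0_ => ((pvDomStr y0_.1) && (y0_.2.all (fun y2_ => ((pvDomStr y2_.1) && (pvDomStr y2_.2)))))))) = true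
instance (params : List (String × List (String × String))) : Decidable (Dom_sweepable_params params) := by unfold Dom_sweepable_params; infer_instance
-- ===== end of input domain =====

-- B replaces A's incrementally-updated dict of deduped lists by a dict-free flat pair list with
-- positional first-occurrence dedup and a per-key rescan; same results, no speed claim.

-- ===== PORT A =====
-- body of A's inner 'for k, v in param.items()' loop
def sweepA_inner (sw : PySem.Dict String (List String)) (kv : String × String) :
    PySem.Dict String (List String) :=
  let sw1 := if sw.contains kv.1 then sw else sw.insert kv.1 []
  if (sw1.getD kv.1 []).contains kv.2 then sw1
  else sw1.insert kv.1 (sw1.getD kv.1 [] ++ [kv.2])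

def sweepable_params (params : List (String × List (String × String))) : List (String × List String) :=
  let sweepable : PySem.Dict String (List String) :=
    params.foldl (fun sw pp => pp.2.foldl sweepA_inner sw) PySem.Dict.empty
  let sweepable2 : PySem.Dict String (List String) :=
    PySem.Dict.mk (sweepable.items.filter (fun kv => decide (1 < kv.2.length)))
  let sweepable3 : PySem.Dict String (List String) :=
    PySem.Dict.mk (sweepable2.items.filter (fun kv => !(PySem.Str.isIn "master_port" (PySem.Str.lower kv.1))))
  sweepable3.items

-- ===== PORT B =====
-- Source B's _distinct: keep x at position i iff xs.index(x) == i
def pvDistinct (xs : List String) : List String :=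
  ((PySem.List.enumerate xs).filter
    (fun p => ((PySem.List.index? xs p.2).map Int.ofNat) == some p.1)).map (·.2)

def sweepable_params_alt (params : List (String × List (String × String))) : List (String × List String) :=
  let pairs : List (String × String) := params.flatMap (fun pp => pp.2)
  let keys := pvDistinct (pairs.map (·.1))
  keys.foldl (fun res k =>
    if PySem.Str.isIn "master_port" (PySem.Str.lower k) then res
    else
      let uniq := pvDistinct ((pairs.filter (fun q => q.1 == k)).map (·.2))
      if 1 < uniq.length then res ++ [(k, uniq)] else res) []

-- ===== PRECONDITION & SPEC =====
def Spec_sweepable_params (params : List (String × List (String × String))) (out : List (String × List String)) : Prop := out = sweepable_params_alt params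
instance (params : List (String × List (String × String))) (out : List (String × List String)) : Decidable (Spec_sweepable_params params out) := by unfold Spec_sweepable_params; infer_instance

-- ===== CLAIM (what is proved, stated in full; the proofs are below) =====
def Claim_equal_sweepable_params : Prop := ∀ (params : List (String × List (String × String))), Dom_sweepable_params params → Spec_sweepable_params params (sweepable_params params)

-- ===== LEMMAS AND PROOFS =====

-- proof-side order-preserving dedup (membership-append fold), and the facts tying both ports to it
def dedupF (xs : List String) : List String :=
  xs.foldl (fun u v => if u.contains v then u else u ++ [v]) []

theorem mem_foldl_dedup (xs u : List String) (v : String) :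
    v ∈ xs.foldl (fun u v => if u.contains v then u else u ++ [v]) u ↔ v ∈ u ∨ v ∈ xs := by
  induction xs generalizing u with
  | nil => simp
  | cons x t ih =>
    simp only [List.foldl_cons, ih, List.mem_cons]
    by_cases h : x ∈ u
    · rw [if_pos (by simpa using h)]
      constructor
      · tauto
      · rintro (hv | rfl | hv)
        · tauto
        · exact Or.inl h
        · tauto
    · rw [if_neg (by simpa using h)]
      simp only [List.mem_append, List.mem_singleton]
      tauto

theorem mem_dedupF (xs : List String) (v : String) : v ∈ dedupF xs ↔ v ∈ xs := by
  rw [dedupF, mem_foldl_dedup]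
  simp

theorem dedupF_append (xs : List String) (a : String) :
    dedupF (xs ++ [a]) = if a ∈ xs then dedupF xs else dedupF xs ++ [a] := by
  have h : dedupF (xs ++ [a])
      = if (dedupF xs).contains a then dedupF xs else dedupF xs ++ [a] := by
    simp only [dedupF, List.foldl_append, List.foldl_cons, List.foldl_nil]
  rw [h]
  by_cases hm : a ∈ xs <;> simp [hm, mem_dedupF]

theorem nodup_foldl_dedup (xs u : List String) (h : u.Nodup) :
    (xs.foldl (fun u v => if u.contains v then u else u ++ [v]) u).Nodup := by
  induction xs generalizing u with
  | nil => exact h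
  | cons x t ih =>
    simp only [List.foldl_cons]
    by_cases hx : x ∈ u
    · simpa [hx] using ih u h
    · have : (u ++ [x]).Nodup := by
        simp [List.nodup_append, h]
        exact fun a ha hax => hx (hax ▸ ha)
      simpa [hx] using ih (u ++ [x]) this

theorem nodup_dedupF (xs : List String) : (dedupF xs).Nodup :=
  nodup_foldl_dedup xs [] List.nodup_nil

theorem pvDistinct_eq_dedupF (xs : List String) : pvDistinct xs = dedupF xs := by
  induction xs using List.reverseRecOn with
  | nil => rfl
  | append_singleton xs a ih =>
    rw [dedupF_append, ← ih]
    simp only [pvDistinct, PySem.List.enumerate_append, PySem.List.enumerate_cons,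
      PySem.List.enumerate_nil, List.filter_append, List.map_append]
    have hfc : List.filter
        (fun p : Int × String => ((PySem.List.index? (xs ++ [a]) p.2).map Int.ofNat) == some p.1)
        (PySem.List.enumerate xs 0)
        = List.filter
        (fun p : Int × String => ((PySem.List.index? xs p.2).map Int.ofNat) == some p.1)
        (PySem.List.enumerate xs 0) := by
      apply List.filter_congr
      intro p hp
      rcases (PySem.List.mem_enumerate_iff _ _ _).mp hp with ⟨k, hk, rfl⟩
      rw [PySem.List.index?_append_of_mem _ (by exact List.getElem_mem hk)]
    rw [hfc]
    by_cases hm : a ∈ xs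
    · rcases h : PySem.List.index? xs a with _ | j
      · exact absurd ((PySem.List.index?_eq_none_iff _ _).mp h) (by simpa using hm)
      · rcases PySem.List.getElem_of_index?_eq_some h with ⟨hj, _, _⟩
        have hidx : PySem.List.index? (xs ++ [a]) a = some j := by
          rw [PySem.List.index?_append_of_mem _ hm, h]
        have hne : ((PySem.List.index? (xs ++ [a]) a).map Int.ofNat
            == some ((0 : Int) + xs.length)) = false := by
          rw [hidx]
          simp only [Option.map_some, beq_eq_false_iff_ne, ne_eq, Option.some.injEq,
            Int.ofNat_eq_natCast]
          omega
        rw [if_pos hm, List.filter_cons, List.filter_nil,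
          if_neg (by simp only [hne]; exact Bool.false_ne_true), List.map_nil, List.append_nil]
    · have hidx : PySem.List.index? (xs ++ [a]) a = some xs.length :=
        PySem.List.index?_append_singleton_self xs a hm
      have heq : ((PySem.List.index? (xs ++ [a]) a).map Int.ofNat
          == some ((0 : Int) + xs.length)) = true := by
        rw [hidx]
        simp [Int.ofNat_eq_natCast]
      rw [if_neg hm, List.filter_cons, List.filter_nil, if_pos (by simp only [heq]),
        List.map_cons, List.map_nil]

-- characterization of A's dict fold over a flat pair list
def valsOf (l : List (String × String)) (k : String) : List String :=
  (l.filter (fun q => q.1 == k)).map (·.2)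

theorem valsOf_append (l : List (String × String)) (k v k' : String) :
    valsOf (l ++ [(k, v)]) k' = valsOf l k' ++ (if k = k' then [v] else []) := by
  by_cases h : k = k' <;> simp [valsOf, List.filter_append, h]

theorem valsOf_of_not_mem (l : List (String × String)) (k : String)
    (h : k ∉ l.map (·.1)) : valsOf l k = [] := by
  simp only [valsOf, List.map_eq_nil_iff, List.filter_eq_nil_iff]
  intro q hq hqk
  have hq1 : q.1 = k := by simpa using hqk
  exact h (hq1 ▸ List.mem_map_of_mem hq)

theorem sweepA_items (l : List (String × String)) :
    (l.foldl sweepA_inner PySem.Dict.empty).items =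
      (dedupF (l.map (·.1))).map (fun k => (k, dedupF (valsOf l k))) := by
  induction l using List.reverseRecOn with
  | nil => rfl
  | append_singleton l kv ih =>
    obtain ⟨k, v⟩ := kv
    simp only [List.foldl_append, List.foldl_cons, List.foldl_nil]
    set S := l.foldl sweepA_inner PySem.Dict.empty with hS
    have hkeys : S.keys = dedupF (l.map (·.1)) := by
      show S.items.map (·.1) = _
      rw [ih, List.map_map]
      simp [Function.comp_def]
    have hnd : S.keys.Nodup := by rw [hkeys]; exact nodup_dedupF _
    have hmapK : (l ++ [(k, v)]).map (·.1) = l.map (·.1) ++ [k] := by simp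
    by_cases hc : k ∈ l.map (·.1)
    · -- key already present
      have hck : S.contains k = true := by
        rw [PySem.Dict.contains_iff_mem_keys, hkeys]
        exact (mem_dedupF _ _).mpr hc
      have hmem : (k, dedupF (valsOf l k)) ∈ S.items := by
        rw [ih]
        exact List.mem_map_of_mem ((mem_dedupF _ _).mpr hc)
      have hget : S.get? k = some (dedupF (valsOf l k)) :=
        PySem.Dict.get?_of_mem_items S hmem hnd
      have hgd : S.getD k [] = dedupF (valsOf l k) := by
        rw [PySem.Dict.getD_eq_get?_getD, hget]; rfl
      have hK' : dedupF ((l ++ [(k, v)]).map (·.1)) = dedupF (l.map (·.1)) := by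
        rw [hmapK, dedupF_append, if_pos hc]
      simp only [sweepA_inner, hck, if_true, hgd]
      by_cases hv : v ∈ valsOf l k
      · -- duplicate value: dict unchanged
        rw [if_pos (by simpa [mem_dedupF] using hv), hK', ih]
        apply List.map_congr_left
        intro k' hk'
        rw [valsOf_append]
        by_cases h : k = k'
        · subst h
          rw [if_pos rfl, dedupF_append, if_pos hv]
        · rw [if_neg h, List.append_nil]
      · -- new value: appended at key k
        rw [if_neg (by simpa [mem_dedupF] using hv), hK']
        rw [PySem.Dict.items_insert_of_contains _ _ hck, ih, List.map_map]
        apply List.map_congr_left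
        intro k' hk'
        rw [valsOf_append]
        by_cases h : k = k'
        · subst h
          simp only [Function.comp_apply, beq_self_eq_true, if_pos]
          rw [dedupF_append, if_neg hv]
        · have hne : (k' == k) = false := by simp [Ne.symm h]
          simp only [Function.comp_apply, hne, Bool.false_eq_true, if_false, if_neg h,
            List.append_nil]
    · -- fresh key
      have hck : S.contains k = false := by
        rw [Bool.eq_false_iff]
        intro h
        rw [PySem.Dict.contains_iff_mem_keys, hkeys, mem_dedupF] at h
        exact hc h
      have hgd1 : (S.insert k []).getD k [] = ([] : List String) := by
        rw [PySem.Dict.getD_eq_get?_getD, PySem.Dict.get?_insert_self]; rfl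
      simp only [sweepA_inner, hck, Bool.false_eq_true, if_false, hgd1,
        List.contains_nil, List.nil_append]
      rw [PySem.Dict.items_insert_of_contains _ _ (PySem.Dict.contains_insert_self _ _ _),
        PySem.Dict.items_insert_of_not_contains _ _ hck]
      rw [hmapK, dedupF_append, if_neg hc, List.map_append, List.map_append, ih, List.map_map]
      congr 1
      · apply List.map_congr_left
        intro k' hk'
        have hk'mem : k' ∈ l.map (·.1) := (mem_dedupF _ _).mp hk'
        have hne : (k' == k) = false := by
          simp only [beq_eq_false_iff_ne, ne_eq]
          intro h; exact hc (h ▸ hk'mem)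
        simp only [Function.comp_apply, hne, Bool.false_eq_true, if_false]
        rw [valsOf_append]
        by_cases h : k = k'
        · exact absurd (h ▸ hk'mem) hc
        · rw [if_neg h, List.append_nil]
      · simp only [List.map_cons, List.map_nil, beq_self_eq_true, if_pos]
        rw [valsOf_append, if_pos rfl, valsOf_of_not_mem l k hc]
        rfl

theorem foldl_flat_gen (params : List (String × List (String × String)))
    (d : PySem.Dict String (List String)) :
    params.foldl (fun sw pp => pp.2.foldl sweepA_inner sw) d =
      (params.flatMap (fun pp => pp.2)).foldl sweepA_inner d := by
  induction params generalizing d with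
  | nil => rfl
  | cons pp t ih => simp [List.foldl_append, ih]

-- B's result loop as filter+map
theorem bfold (u : String → List String) (m : String → Bool) (K : List String)
    (res : List (String × List String)) :
    K.foldl (fun res k => if m k = true then res
      else if 1 < (u k).length then res ++ [(k, u k)] else res) res
      = res ++ (K.filter (fun k => decide (1 < (u k).length) && !(m k))).map (fun k => (k, u k)) := by
  induction K generalizing res with
  | nil => simp
  | cons k t ih =>
    by_cases h1 : m k <;> by_cases h2 : 1 < (u k).length <;>
      simp [h1, h2, ih]

-- ===== VERDICT (by name: the statement is the Claim_ definition above) =====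
theorem sweepable_params_spec : Claim_equal_sweepable_params := by
  intro params _
  show sweepable_params params = sweepable_params_alt params
  simp only [sweepable_params, sweepable_params_alt, foldl_flat_gen, sweepA_items,
    pvDistinct_eq_dedupF]
  generalize params.flatMap (fun pp => pp.2) = pairs
  rw [bfold (fun k => dedupF ((pairs.filter (fun q => q.1 == k)).map (·.2)))
      (fun k => PySem.Str.isIn "master_port" (PySem.Str.lower k))]
  simp only [List.nil_append, List.filter_map, List.filter_filter, Function.comp_def, valsOf]
  refine congrArg _ (List.filter_congr ?_)
  intro k _
  exact Bool.and_comm _ _
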